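-- pv_equiv track=rewrite | github.com/minhyukkk/CodeTest | 프로그래머스/unrated/132267. 콜라 문제/콜라 문제.py | solution
-- ===== SOURCE A (Python) =====
-- def solution(a, b, n):
--     answer = 0
--     bottle = 0
--
--     while True:
--         if n >= a:
--             bottle = n % a
--             n = n//a * b
--             answer += n
--             n += bottle
--         else:
--             break
--     return answer
-- ===== SOURCE B (Python) =====
-- def solution(a, b, n):
--     return 0 if n < a else (n - b) // (a - b) * b
-- ===== Notes on version B (the rewrite author's own statement) =====
-- stated objective: alternative
-- what changed: Replaces A's simulate-the-exchanges while-loop with the closed-form formula (n - b) // (a - b) * b (0 when n < a); intended as asymptotically faster (O(1) vs O(log n)) but A is already too fast at the sampled sizes for a timing run to confirm a ratio.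
-- outside the precondition, e.g. on solution(2, -3, 10): A returns -15, B returns -6
import Mathlib
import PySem

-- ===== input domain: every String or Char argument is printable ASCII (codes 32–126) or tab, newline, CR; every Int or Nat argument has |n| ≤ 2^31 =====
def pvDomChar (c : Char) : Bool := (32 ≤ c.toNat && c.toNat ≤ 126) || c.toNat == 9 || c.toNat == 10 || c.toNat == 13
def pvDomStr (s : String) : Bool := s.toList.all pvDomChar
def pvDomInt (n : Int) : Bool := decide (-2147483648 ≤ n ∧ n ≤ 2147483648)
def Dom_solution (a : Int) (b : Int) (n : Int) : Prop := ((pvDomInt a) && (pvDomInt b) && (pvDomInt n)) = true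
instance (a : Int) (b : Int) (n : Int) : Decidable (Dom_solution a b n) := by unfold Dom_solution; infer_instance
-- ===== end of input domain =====

-- B replaces A's exchange-simulation loop with the closed-form formula (n - b) // (a - b) * b.


-- ===== PORT A =====
-- A's `while True` loop, transcribed with a fuel bound; inside Pre_solution the
-- loop's n strictly decreases while n ≥ a ≥ 1, so fuel n.toNat + 1 is never exhausted.
def solutionLoop (a : Int) (b : Int) : Nat → Int → Int → Int
  | 0, _, answer => answer
  | fuel + 1, n, answer =>
    if n ≥ a then
      let bottle := PySem.Int.mod n a
      let n1 := PySem.Int.floordiv n a * b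
      solutionLoop a b fuel (n1 + bottle) (answer + n1)
    else answer

def solution (a : Int) (b : Int) (n : Int) : Int :=
  solutionLoop a b (n.toNat + 1) n 0

-- ===== PORT B =====
def solution_alt (a : Int) (b : Int) (n : Int) : Int :=
  if n < a then 0 else PySem.Int.floordiv (n - b) (a - b) * b

-- ===== PRECONDITION & SPEC =====
-- Pre_ restricts to the task's natural domain when any exchange happens (n ≥ a):
-- an exchange rate with 0 ≤ b < a. Outside it A raises ZeroDivisionError (a = 0),
-- loops forever (a ≤ b or a < 0 cases), or returns meaningless negative totals for
-- a nonsensical negative exchange rate b < 0. When n < a, A returns 0 for all a, b.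
def Pre_solution (a : Int) (b : Int) (n : Int) : Prop := n < a ∨ (0 ≤ b ∧ b < a)
instance (a : Int) (b : Int) (n : Int) : Decidable (Pre_solution a b n) := by unfold Pre_solution; infer_instance
def pvWitness_solution : Int × Int × Int := (3, 1, 20)
def Spec_solution (a : Int) (b : Int) (n : Int) (out : Int) : Prop := out = solution_alt a b n
instance (a : Int) (b : Int) (n : Int) (out : Int) : Decidable (Spec_solution a b n out) := by unfold Spec_solution; infer_instance

-- ===== CLAIM (what is proved, stated in full; the proofs are below) =====
def Claim_equal_solution : Prop := ∀ (a : Int) (b : Int) (n : Int), Dom_solution a b n → Pre_solution a b n → Spec_solution a b n (solution a b n)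

-- ===== LEMMAS AND PROOFS =====

-- the closed form as a function of the remaining-bottle count
def closedForm (a : Int) (b : Int) (n : Int) : Int :=
  if n < a then 0 else PySem.Int.floordiv (n - b) (a - b) * b

theorem closedForm_step (a b n : Int) (hb0 : 0 ≤ b) (hba : b < a) (hn : a ≤ n) :
    closedForm a b n =
      PySem.Int.floordiv n a * b + closedForm a b (PySem.Int.floordiv n a * b + PySem.Int.mod n a) := by
  have ha : (0:Int) < a := lt_of_le_of_lt hb0 hba
  have hab : (0:Int) < a - b := by omega
  rw [PySem.Int.floordiv_eq_ediv_of_pos ha, PySem.Int.mod_eq_emod_of_pos ha,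
      closedForm, closedForm, PySem.Int.floordiv_eq_ediv_of_pos hab]
  set q := n / a with hq
  set r := n % a with hr
  have hqr : a * q + r = n := Int.mul_ediv_add_emod n a
  have hr0 : 0 ≤ r := Int.emod_nonneg n (by omega)
  have hra : r < a := Int.emod_lt_of_pos n ha
  have hq1 : 1 ≤ q := (Int.le_ediv_iff_mul_le ha).mpr (by omega)
  have hm : q * b + r ≥ b := by nlinarith
  have hna : ¬ n < a := by omega
  simp only [if_neg hna]
  by_cases hcase : q * b + r < a
  · -- next n is below a: the remaining closed form is q (one division step left)
    simp only [if_pos hcase]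
    have hdiv : (n - b) / (a - b) = q := by
      have hs : n - b = (q * b + r - b) + q * (a - b) := by linear_combination -hqr
      rw [hs, Int.add_mul_ediv_right _ _ (by omega : a - b ≠ 0),
          Int.ediv_eq_zero_of_lt (by omega) (by omega)]
      omega
    rw [hdiv]; ring
  · simp only [if_neg hcase, PySem.Int.floordiv_eq_ediv_of_pos hab]
    have hsplit : n - b = (q * b + r - b) + q * (a - b) := by linear_combination -hqr
    rw [hsplit, Int.add_mul_ediv_right _ _ (by omega : a - b ≠ 0)]
    ring

theorem loop_next_lt (a b n : Int) (hb0 : 0 ≤ b) (hba : b < a) (hn : a ≤ n) :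
    PySem.Int.floordiv n a * b + PySem.Int.mod n a < n ∧
      0 ≤ PySem.Int.floordiv n a * b + PySem.Int.mod n a := by
  have ha : (0:Int) < a := lt_of_le_of_lt hb0 hba
  rw [PySem.Int.floordiv_eq_ediv_of_pos ha, PySem.Int.mod_eq_emod_of_pos ha]
  have hqr : a * (n / a) + n % a = n := Int.mul_ediv_add_emod n a
  have hr0 : 0 ≤ n % a := Int.emod_nonneg n (by omega)
  have hra : n % a < a := Int.emod_lt_of_pos n ha
  have hq1 : 1 ≤ n / a := (Int.le_ediv_iff_mul_le ha).mpr (by omega)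
  constructor
  · nlinarith
  · have : 0 ≤ n / a * b := mul_nonneg (by omega) hb0
    omega

theorem loop_eq_closedForm (a b : Int) (hb0 : 0 ≤ b) (hba : b < a) :
    ∀ (fuel : Nat) (n answer : Int), (n < a ∨ n.toNat < fuel) →
      solutionLoop a b fuel n answer = answer + closedForm a b n := by
  intro fuel
  induction fuel with
  | zero =>
    intro n answer h
    have hn : n < a := by omega
    simp [solutionLoop, closedForm, if_pos hn]
  | succ fuel ih =>
    intro n answer h
    by_cases hn : n ≥ a
    · have ⟨hlt, hpos⟩ := loop_next_lt a b n hb0 hba hn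
      have ha : (0:Int) < a := lt_of_le_of_lt hb0 hba
      have hfuel : (PySem.Int.floordiv n a * b + PySem.Int.mod n a).toNat < fuel := by omega
      simp only [solutionLoop, if_pos hn]
      rw [ih _ _ (Or.inr hfuel), closedForm_step a b n hb0 hba hn]
      ring
    · simp [solutionLoop, hn, closedForm, show n < a by omega]

-- ===== VERDICT (by name: the statement is the Claim_ definition above) =====
theorem solution_spec : Claim_equal_solution := by
  intro a b n _ hpre
  show solution a b n = solution_alt a b n
  rcases hpre with hna | ⟨hb0, hba⟩
  · simp [solution, solutionLoop, solution_alt, if_pos hna, show ¬ n ≥ a by omega]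
  · rw [solution, loop_eq_closedForm a b hb0 hba _ _ _ (Or.inr (by omega)),
        zero_add]
    rfl
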